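-- pv_equiv track=rewrite | github.com/pawelkuk/checkers | checkers/piece.py | get_diagonal_moves
-- ===== SOURCE A (Python) =====
-- from typing import Iterable, Tuple
--
-- def get_diagonal_moves(x: int, y: int, dim: int) -> Iterable[Tuple[int, int]]:
--     dirs = [(1, 1), (1, -1), (-1, 1), (-1, -1)]
--     moves = []
--     for dx, dy in dirs:
--         for i in range(1, dim):
--             new_x, new_y = x + i * dx, y + i * dy
--             if not (0 <= new_x < dim and 0 <= new_y < dim):
--                 break
--             moves.append((new_x, new_y))
--     return moves
-- ===== SOURCE B (Python) =====
-- def get_diagonal_moves(x, y, dim):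
--     moves = []
--     for dx, dy in ((1, 1), (1, -1), (-1, 1), (-1, -1)):
--         if 0 <= x + dx < dim and 0 <= y + dy < dim:
--             limx = dim - 1 - x if dx > 0 else x
--             limy = dim - 1 - y if dy > 0 else y
--             limit = min(limx, limy, dim - 1)
--             moves.extend((x + i * dx, y + i * dy) for i in range(1, limit + 1))
--     return moves
-- ===== Notes on version B (the rewrite author's own statement) =====
-- stated objective: simpler
-- what changed: Replaces the per-step bounds-check-and-break scan with a closed-form extent per direction: a single first-step guard plus an arithmetic limit, then an unconditional range emit.
import Mathlib
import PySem

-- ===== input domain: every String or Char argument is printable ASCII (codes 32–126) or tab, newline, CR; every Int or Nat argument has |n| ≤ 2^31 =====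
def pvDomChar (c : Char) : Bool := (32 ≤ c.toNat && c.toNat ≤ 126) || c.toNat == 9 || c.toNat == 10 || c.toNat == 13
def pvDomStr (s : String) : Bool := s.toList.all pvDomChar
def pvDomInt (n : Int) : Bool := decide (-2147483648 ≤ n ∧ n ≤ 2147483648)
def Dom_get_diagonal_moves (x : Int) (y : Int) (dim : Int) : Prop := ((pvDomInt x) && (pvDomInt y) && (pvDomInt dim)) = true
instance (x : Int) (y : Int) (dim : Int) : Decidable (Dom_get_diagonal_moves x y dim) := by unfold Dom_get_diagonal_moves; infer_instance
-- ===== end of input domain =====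

-- B replaces A's per-step bounds-check-and-break scan by a first-step guard plus a
-- closed-form step limit per direction (objective: simpler).

-- ===== PORT A =====
-- inner 'for i in range(1, dim): … break' loop: Python's range is lazy, so it is ported as
-- an index loop from i up to dim, with the break modelled by returning the accumulated
-- moves as soon as the bounds check fails
def pvAInner (x y dx dy dim : Int) (i : Int) (moves : List (Int × Int)) : List (Int × Int) :=
  if i < dim then
    let nx := x + i * dx
    let ny := y + i * dy
    if ¬(0 ≤ nx ∧ nx < dim ∧ 0 ≤ ny ∧ ny < dim) then moves
    else pvAInner x y dx dy dim (i + 1) (moves ++ [(nx, ny)])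
  else moves
termination_by (dim - i).toNat
decreasing_by omega

def get_diagonal_moves (x : Int) (y : Int) (dim : Int) : List (Int × Int) :=
  let dirs : List (Int × Int) := [(1, 1), (1, -1), (-1, 1), (-1, -1)]
  dirs.foldl (fun moves d => pvAInner x y d.1 d.2 dim 1 moves) []

-- ===== PORT B =====
-- one direction of B: guard on the first step, then emit the whole run at once
def pvBDir (x y dx dy dim : Int) : List (Int × Int) :=
  if 0 ≤ x + dx ∧ x + dx < dim ∧ 0 ≤ y + dy ∧ y + dy < dim then
    let limx := if dx > 0 then dim - 1 - x else x
    let limy := if dy > 0 then dim - 1 - y else y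
    let limit := min (min limx limy) (dim - 1)
    (PySem.List.pyRange 1 (limit + 1) 1).map (fun i => (x + i * dx, y + i * dy))
  else []

def get_diagonal_moves_alt (x : Int) (y : Int) (dim : Int) : List (Int × Int) :=
  let dirs : List (Int × Int) := [(1, 1), (1, -1), (-1, 1), (-1, -1)]
  dirs.foldl (fun moves d => moves ++ pvBDir x y d.1 d.2 dim) []

-- ===== PRECONDITION & SPEC =====
def Spec_get_diagonal_moves (x : Int) (y : Int) (dim : Int) (out : List (Int × Int)) : Prop := out = get_diagonal_moves_alt x y dim
instance (x : Int) (y : Int) (dim : Int) (out : List (Int × Int)) : Decidable (Spec_get_diagonal_moves x y dim out) := by unfold Spec_get_diagonal_moves; infer_instance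

-- ===== CLAIM (what is proved, stated in full; the proofs are below) =====
def Claim_equal_get_diagonal_moves : Prop := ∀ (x : Int) (y : Int) (dim : Int), Dom_get_diagonal_moves x y dim → Spec_get_diagonal_moves x y dim (get_diagonal_moves x y dim)

-- ===== LEMMAS AND PROOFS =====

-- A's inner loop from start index a, under the interval characterisation of the bounds
-- check (ok i ↔ i ≤ c for all i ≥ a), equals appending the closed-form run.
theorem pvAInner_run (x y dx dy dim c : Int)
    (a : Int) (ha : 1 ≤ a)
    (H : ∀ i : Int, a ≤ i → ((0 ≤ x + i * dx ∧ x + i * dx < dim ∧ 0 ≤ y + i * dy ∧ y + i * dy < dim) ↔ i ≤ c))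
    (moves : List (Int × Int)) :
    pvAInner x y dx dy dim a moves =
      moves ++ (PySem.List.pyRange a (min c (dim - 1) + 1) 1).map
        (fun i => (x + i * dx, y + i * dy)) := by
  rw [pvAInner]
  by_cases hlt : a < dim
  · rw [if_pos hlt]
    by_cases hok : a ≤ c
    · have hOK := (H a le_rfl).mpr hok
      rw [PySem.List.pyRange_one_cons (show a < min c (dim - 1) + 1 by omega)]
      show (if ¬(0 ≤ x + a * dx ∧ x + a * dx < dim ∧ 0 ≤ y + a * dy ∧ y + a * dy < dim)
            then moves
            else pvAInner x y dx dy dim (a + 1) (moves ++ [(x + a * dx, y + a * dy)])) = _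
      rw [if_neg (not_not_intro hOK)]
      rw [pvAInner_run x y dx dy dim c (a + 1) (by omega)
        (fun i hi => H i (by omega)) (moves ++ [(x + a * dx, y + a * dy)])]
      simp
    · have hbad : ¬(0 ≤ x + a * dx ∧ x + a * dx < dim ∧ 0 ≤ y + a * dy ∧ y + a * dy < dim) := by
        intro h; exact hok ((H a le_rfl).mp h)
      rw [PySem.List.pyRange_one_eq_nil (show min c (dim - 1) + 1 ≤ a by omega)]
      show (if ¬(0 ≤ x + a * dx ∧ x + a * dx < dim ∧ 0 ≤ y + a * dy ∧ y + a * dy < dim)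
            then moves
            else pvAInner x y dx dy dim (a + 1) (moves ++ [(x + a * dx, y + a * dy)])) = _
      rw [if_pos hbad]
      simp
  · rw [if_neg hlt,
        PySem.List.pyRange_one_eq_nil (show min c (dim - 1) + 1 ≤ a by omega)]
    simp
termination_by (dim - a).toNat
decreasing_by omega

-- one direction: A's inner loop equals appending B's closed-form run, for dx,dy ∈ {1,-1}
theorem pvDir_eq (x y dx dy dim : Int)
    (hdx : dx = 1 ∨ dx = -1) (hdy : dy = 1 ∨ dy = -1)
    (moves : List (Int × Int)) :
    pvAInner x y dx dy dim 1 moves = moves ++ pvBDir x y dx dy dim := by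
  unfold pvBDir
  by_cases hg : 0 ≤ x + dx ∧ x + dx < dim ∧ 0 ≤ y + dy ∧ y + dy < dim
  · rw [if_pos hg]
    set limx := if dx > 0 then dim - 1 - x else x with hlimx
    set limy := if dy > 0 then dim - 1 - y else y with hlimy
    have H : ∀ i : Int, (1 : Int) ≤ i →
        ((0 ≤ x + i * dx ∧ x + i * dx < dim ∧ 0 ≤ y + i * dy ∧ y + i * dy < dim) ↔
          i ≤ min limx limy) := by
      intro i hi
      rcases hdx with h1 | h1 <;> rcases hdy with h2 | h2 <;>
        simp only [hlimx, hlimy, h1, h2] <;> norm_num <;> omega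
    rw [pvAInner_run x y dx dy dim (min limx limy) 1 le_rfl H moves]
  · rw [if_neg hg, pvAInner]
    have hbad : ¬(0 ≤ x + 1 * dx ∧ x + 1 * dx < dim ∧ 0 ≤ y + 1 * dy ∧ y + 1 * dy < dim) := by
      simpa using hg
    by_cases hlt : (1 : Int) < dim
    · rw [if_pos hlt]
      show (if ¬(0 ≤ x + 1 * dx ∧ x + 1 * dx < dim ∧ 0 ≤ y + 1 * dy ∧ y + 1 * dy < dim)
            then moves
            else pvAInner x y dx dy dim (1 + 1) (moves ++ [(x + 1 * dx, y + 1 * dy)])) = _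
      rw [if_pos hbad]
      simp
    · rw [if_neg hlt]
      simp

-- ===== VERDICT (by name: the statement is the Claim_ definition above) =====
theorem get_diagonal_moves_spec : Claim_equal_get_diagonal_moves := by
  intro x y dim _
  unfold Spec_get_diagonal_moves get_diagonal_moves get_diagonal_moves_alt
  simp only [List.foldl]
  rw [pvDir_eq x y 1 1 dim (Or.inl rfl) (Or.inl rfl),
      pvDir_eq x y 1 (-1) dim (Or.inl rfl) (Or.inr rfl),
      pvDir_eq x y (-1) 1 dim (Or.inr rfl) (Or.inl rfl),
      pvDir_eq x y (-1) (-1) dim (Or.inr rfl) (Or.inr rfl)]
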